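-- pv_equiv track=rewrite | github.com/rinama07/DojoAgePython | src/FindShorterWord.py | find_shorter_word
-- ===== SOURCE A (Python) =====
-- def find_shorter_word(words):
--
--     words_quantity = int(words.__len__())
--     shorter = ""
--
--     for index in range(words_quantity):
--         word = words[index]
--
--         if index == 0 or word.__len__() < shorter.__len__():
--             shorter = word
--
--     return shorter
-- ===== SOURCE B (Python) =====
-- def find_shorter_word(words):
--     ordered = sorted(words, key=len)
--     return ordered[0] if ordered else ""
-- ===== Notes on version B (the rewrite author's own statement) =====
-- stated objective: idiomatic
-- what changed: Replaces the index-loop running-minimum scan with a stable sort by length followed by taking the first element (empty list yields "").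
import Mathlib
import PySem

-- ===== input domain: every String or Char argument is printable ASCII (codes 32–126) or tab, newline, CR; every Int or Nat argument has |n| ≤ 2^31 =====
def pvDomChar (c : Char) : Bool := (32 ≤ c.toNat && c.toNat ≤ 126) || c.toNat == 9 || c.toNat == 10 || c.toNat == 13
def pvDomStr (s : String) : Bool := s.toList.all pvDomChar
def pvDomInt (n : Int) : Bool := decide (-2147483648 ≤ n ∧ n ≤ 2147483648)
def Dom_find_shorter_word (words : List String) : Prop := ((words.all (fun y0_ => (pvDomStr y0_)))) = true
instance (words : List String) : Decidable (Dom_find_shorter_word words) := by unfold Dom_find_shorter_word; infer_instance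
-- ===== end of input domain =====

-- B replaces A's index-loop running-minimum scan with a stable sort by length and taking the head ("" when empty); same return value.

-- ===== PORT A =====
-- words[index] is always in range inside the loop; ported with pyGetD (default never used).
def find_shorter_word (words : List String) : String :=
  let words_quantity : Int := (words.length : Int)
  (PySem.List.pyRange 0 words_quantity 1).foldl
    (fun shorter index =>
      let word := PySem.List.pyGetD words index ""
      if index == 0 || PySem.Str.len word < PySem.Str.len shorter then word else shorter) ""

-- ===== PORT B =====
def find_shorter_word_alt (words : List String) : String :=
  let ordered := PySem.List.sorted words (fun w => PySem.Str.len w)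
  match ordered with
  | [] => ""
  | w :: _ => w

-- ===== PRECONDITION & SPEC =====
def Spec_find_shorter_word (words : List String) (out : String) : Prop := out = find_shorter_word_alt words
instance (words : List String) (out : String) : Decidable (Spec_find_shorter_word words out) := by unfold Spec_find_shorter_word; infer_instance

-- ===== CLAIM (what is proved, stated in full; the proofs are below) =====
def Claim_equal_find_shorter_word : Prop := ∀ (words : List String), Dom_find_shorter_word words → Spec_find_shorter_word words (find_shorter_word words)

-- ===== LEMMAS AND PROOFS =====

-- the running-minimum step shared by both characterisations
def pvStep (acc x : String) : String :=
  if PySem.Str.len x < PySem.Str.len acc then x else acc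

lemma A_eq_fold (words : List String) :
    find_shorter_word words = match words with
      | [] => ""
      | w :: ws => ws.foldl pvStep w := by
  cases words with
  | nil => simp [find_shorter_word, PySem.List.pyRange_one_eq_nil]
  | cons w ws =>
    simp only [find_shorter_word]
    rw [PySem.List.pyRange_one_cons (by simp)]
    simp only [List.foldl_cons]
    have h0 : (if (0 : Int) == 0 || PySem.Str.len (PySem.List.pyGetD (w :: ws) 0 "") < PySem.Str.len "" then PySem.List.pyGetD (w :: ws) 0 "" else "") = w := by
      simp
    rw [h0]
    rw [PySem.List.foldl_congr_mem _ _
        (fun acc j => pvStep acc (PySem.List.pyGetD (w :: ws) j "")) w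
        (by
          intro acc j hj
          have h1 : 1 ≤ j := (PySem.List.mem_pyRange_one.mp hj).1
          have : (j == 0) = false := by simp; omega
          simp [this, pvStep])]
    rw [PySem.List.foldl_pyRange_pyGetD' (w :: ws) "" pvStep w (by norm_num)]
    simp

lemma pvInsertBy_cons (before : String → String → Bool) (x y : String) (ys : List String) :
    PySem.List.insertBy before x (y :: ys)
      = if before x y then x :: y :: ys else y :: PySem.List.insertBy before x ys := rfl

lemma fold_insertBy_head (ws : List String) (c : String) (cs : List String) :
    ∃ ds, ws.foldl (fun acc x =>
        PySem.List.insertBy (fun a b => decide (PySem.Str.len a < PySem.Str.len b)) x acc) (c :: cs)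
      = (ws.foldl pvStep c) :: ds := by
  induction ws generalizing c cs with
  | nil => exact ⟨cs, rfl⟩
  | cons x ws ih =>
    simp only [List.foldl_cons]
    rw [pvInsertBy_cons]
    by_cases h : PySem.Str.len x < PySem.Str.len c
    · rw [if_pos (by simpa using h)]
      obtain ⟨ds, hd⟩ := ih x (c :: cs)
      exact ⟨ds, by rw [hd, show pvStep c x = x from by unfold pvStep; rw [if_pos h]]⟩
    · rw [if_neg (by simpa using h)]
      obtain ⟨ds, hd⟩ := ih c _
      exact ⟨ds, by rw [hd, show pvStep c x = c from by unfold pvStep; rw [if_neg h]]⟩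

lemma B_eq_fold (words : List String) :
    find_shorter_word_alt words = match words with
      | [] => ""
      | w :: ws => ws.foldl pvStep w := by
  cases words with
  | nil => simp [find_shorter_word_alt, PySem.List.sorted]
  | cons w ws =>
    unfold find_shorter_word_alt
    rw [PySem.List.sorted_eq_foldl_insertBy]
    simp only [List.foldl_cons]
    rw [show PySem.List.insertBy (fun a b => decide (PySem.Str.len a < PySem.Str.len b)) w []
        = [w] from rfl]
    obtain ⟨ds, hd⟩ := fold_insertBy_head ws w []
    rw [hd]

-- ===== VERDICT (by name: the statement is the Claim_ definition above) =====
theorem find_shorter_word_spec : Claim_equal_find_shorter_word := by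
  intro words _
  unfold Spec_find_shorter_word
  rw [A_eq_fold, B_eq_fold]
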